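-- pv_equiv track=rewrite | github.com/Apjo/algorithms_and_datastructures | src/dsa/python/lc_contests/virtual_biweekly_176/q2.py | prefixConnected
-- ===== SOURCE A (Python) =====
-- from typing import List
--
-- def prefixConnected(words: List[str], k: int) -> int:
--     mp = {}
--     if not words:
--         return 0
--     if k < 0 :
--         return 0
--     for word in words:
--         if len(word) < k :
--             continue
--         pref_w = word[:k]
--         if pref_w in mp:
--             mp[pref_w]+=1
--         else:
--             mp[pref_w] = 1
--     ans=0
--     for k, v in mp.items():
--         if v >= 2:
--             ans+=1
--     return ans
-- ===== SOURCE B (Python) =====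
-- from typing import List
--
-- def prefixConnected(words: List[str], k: int) -> int:
--     if not words or k < 0:
--         return 0
--     prefs = sorted(w[:k] for w in words if len(w) >= k)
--     ans = 0
--     i = 0
--     n = len(prefs)
--     while i < n:
--         j = i + 1
--         while j < n and prefs[j] == prefs[i]:
--             j += 1
--         if j - i >= 2:
--             ans += 1
--         i = j
--     return ans
-- ===== Notes on version B (the rewrite author's own statement) =====
-- stated objective: alternative
-- what changed: Replaces A's counting dictionary (hash map of prefix frequencies scanned at the end) by sort-then-sweep: collect the qualifying prefixes, sort them, and count runs of equal consecutive prefixes of length >= 2 in one pass.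
import Mathlib
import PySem

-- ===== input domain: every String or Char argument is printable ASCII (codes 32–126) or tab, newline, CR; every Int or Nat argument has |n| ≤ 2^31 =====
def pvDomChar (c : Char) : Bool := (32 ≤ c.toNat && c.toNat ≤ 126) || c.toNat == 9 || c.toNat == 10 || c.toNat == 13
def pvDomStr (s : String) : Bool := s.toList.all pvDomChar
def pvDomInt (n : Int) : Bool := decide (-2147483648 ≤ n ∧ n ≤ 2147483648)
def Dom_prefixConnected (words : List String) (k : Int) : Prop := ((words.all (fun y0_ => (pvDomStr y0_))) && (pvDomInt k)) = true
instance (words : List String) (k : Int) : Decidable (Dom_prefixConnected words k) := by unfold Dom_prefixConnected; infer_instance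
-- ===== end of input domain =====

-- B replaces A's counting dictionary by sort-then-sweep: it sorts the qualifying
-- prefixes and counts runs of length ≥ 2 in one pass (objective: alternative).

-- ===== PORT A =====
def prefixConnected (words : List String) (k : Int) : Int :=
  if words = [] then 0
  else if k < 0 then 0
  else
    let mp := words.foldl (fun (mp : PySem.Dict String Int) word =>
      if PySem.Str.len word < k then mp
      else
        let pref_w := PySem.Str.slice word none (some k)
        match mp.get? pref_w with
        | some v => mp.insert pref_w (v + 1)
        | none => mp.insert pref_w 1) PySem.Dict.empty
    mp.items.foldl (fun ans kv => if 2 ≤ kv.2 then ans + 1 else ans) 0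

-- ===== PORT B =====
-- the outer while loop of Source B: each step consumes one run of equal prefixes
def runSweep : List String → Int
  | [] => 0
  | x :: xs =>
    (if 2 ≤ (xs.takeWhile (fun y => y == x)).length + 1 then (1 : Int) else 0)
      + runSweep (xs.dropWhile (fun y => y == x))
termination_by l => l.length
decreasing_by
  simpa using Nat.lt_succ_of_le (List.length_dropWhile_le _ xs)

def prefixConnected_alt (words : List String) (k : Int) : Int :=
  if words = [] ∨ k < 0 then 0
  else
    let prefs := (words.filter (fun w => decide (k ≤ PySem.Str.len w))).map
      (fun w => PySem.Str.slice w none (some k))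
    runSweep (PySem.List.sorted prefs (fun x => x) false)

-- ===== PRECONDITION & SPEC =====
def Spec_prefixConnected (words : List String) (k : Int) (out : Int) : Prop := out = prefixConnected_alt words k
instance (words : List String) (k : Int) (out : Int) : Decidable (Spec_prefixConnected words k out) := by unfold Spec_prefixConnected; infer_instance

-- ===== CLAIM (what is proved, stated in full; the proofs are below) =====
def Claim_equal_prefixConnected : Prop := ∀ (words : List String) (k : Int), Dom_prefixConnected words k → Spec_prefixConnected words k (prefixConnected words k)

-- ===== LEMMAS AND PROOFS =====

-- number of distinct elements occurring at least twice
def dupCount (l : List String) : Nat :=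
  (l.toFinset.filter (fun p => 2 ≤ l.count p)).card

lemma step_eq_insert (d : PySem.Dict String Int) (x : String) :
    (match d.get? x with
     | some v => d.insert x (v + 1)
     | none => d.insert x 1) = d.insert x (d.getD x 0 + 1) := by
  cases h : d.get? x <;> simp [PySem.Dict.getD_eq_get?_getD, h]

lemma foldA_eq_counter (k : Int) (ws : List String) (d : PySem.Dict String Int) :
    ws.foldl (fun (mp : PySem.Dict String Int) word =>
      if PySem.Str.len word < k then mp
      else
        match mp.get? (PySem.Str.slice word none (some k)) with
        | some v => mp.insert (PySem.Str.slice word none (some k)) (v + 1)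
        | none => mp.insert (PySem.Str.slice word none (some k)) 1) d
    = ((ws.filter (fun w => decide (k ≤ PySem.Str.len w))).map
        (fun w => PySem.Str.slice w none (some k))).foldl
        (fun d x => d.insert x (d.getD x 0 + 1)) d := by
  induction ws generalizing d with
  | nil => rfl
  | cons w ws ih =>
    simp only [List.foldl_cons, List.filter_cons, decide_eq_true_eq]
    by_cases h : PySem.Str.len w < k
    · rw [if_pos h, if_neg (not_le.mpr h), ih]
    · rw [if_neg h, if_pos (not_lt.mp h), step_eq_insert, List.map_cons, List.foldl_cons, ih]

lemma dupCount_perm {l l' : List String} (h : l.Perm l') : dupCount l = dupCount l' := by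
  unfold dupCount
  have ht : l.toFinset = l'.toFinset := by
    ext a; simp [List.mem_toFinset, h.mem_iff]
  rw [ht]
  congr 1
  apply Finset.filter_congr
  intro p _
  simp [h.count_eq]

lemma not_pred_of_dropWhile_cons {α : Type} {p : α → Bool} {l : List α} {h : α} {t : List α}
    (e : l.dropWhile p = h :: t) : p h = false := by
  induction l with
  | nil => simp at e
  | cons a l ih =>
    rw [List.dropWhile_cons] at e
    by_cases hp : p a = true
    · exact ih (by simpa [hp] using e)
    · simp [hp] at e
      rw [← e.1]
      simpa using hp

lemma not_mem_dropWhile_beq_of_sorted {x : String} {xs : List String}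
    (hs : (x :: xs).Pairwise (· ≤ ·)) :
    x ∉ xs.dropWhile (fun y => y == x) := by
  intro hmem
  cases hd : xs.dropWhile (fun y => y == x) with
  | nil => rw [hd] at hmem; simp at hmem
  | cons h t =>
    rw [hd] at hmem
    have hne : h ≠ x := by
      have := not_pred_of_dropWhile_cons hd
      simpa using this
    have hxle : ∀ y ∈ xs, x ≤ y := fun y hy => (List.pairwise_cons.mp hs).1 y hy
    have hsub : (h :: t).Sublist xs := hd ▸ List.dropWhile_sublist _
    have hpd : (h :: t).Pairwise (· ≤ ·) :=
      ((List.pairwise_cons.mp hs).2).sublist hsub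
    have hxh : x ≤ h := hxle h (hsub.mem (by simp))
    rcases List.mem_cons.mp hmem with e | hx_t
    · exact hne e.symm
    · have hhx : h ≤ x := (List.pairwise_cons.mp hpd).1 x hx_t
      exact hne (le_antisymm hhx hxh)

lemma count_eq_length_of_all_eq {t : List String} {x : String}
    (h : ∀ y ∈ t, y = x) : t.count x = t.length := by
  rw [List.count_eq_length]
  intro b hb; exact (h b hb).symm

lemma runSweep_eq_dupCount : ∀ (s : List String), s.Pairwise (· ≤ ·) →
    runSweep s = (dupCount s : Int) := by
  intro s
  induction s using runSweep.induct with
  | case1 => intro _; simp [runSweep, dupCount]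
  | case2 x xs ih =>
    intro hs
    set t := xs.takeWhile (fun y => y == x) with hT
    set d := xs.dropWhile (fun y => y == x) with hD
    have hsplit : t ++ d = xs := List.takeWhile_append_dropWhile
    have hall : ∀ y ∈ t, y = x := by
      intro y hy
      have := List.mem_takeWhile_imp (hT ▸ hy)
      simpa using this
    have hxd : x ∉ d := not_mem_dropWhile_beq_of_sorted hs
    have hpd : d.Pairwise (· ≤ ·) :=
      ((List.pairwise_cons.mp hs).2).sublist (List.dropWhile_sublist _)
    have hcx : (x :: xs).count x = t.length + 1 := by
      rw [List.count_cons_self, ← hsplit, List.count_append,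
        count_eq_length_of_all_eq hall, List.count_eq_zero.mpr hxd]
    have hcne : ∀ p, p ≠ x → (x :: xs).count p = d.count p := by
      intro p hp
      have h0 : t.count p = 0 := List.count_eq_zero.mpr (fun hmem => hp (hall p hmem))
      rw [← hsplit]
      simp [List.count_append, h0, Ne.symm hp]
    have hfin : (x :: xs).toFinset = insert x d.toFinset := by
      ext a
      simp only [List.toFinset_cons, Finset.mem_insert, List.mem_toFinset, ← hsplit,
        List.mem_append]
      constructor
      · rintro (rfl | hy | hy)
        · exact Or.inl rfl
        · exact Or.inl (hall a hy)
        · exact Or.inr hy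
      · rintro (rfl | hy)
        · exact Or.inl rfl
        · exact Or.inr (Or.inr hy)
    have hdup : dupCount (x :: xs)
        = (if 2 ≤ (x :: xs).count x then 1 else 0) + dupCount d := by
      unfold dupCount
      rw [hfin, Finset.filter_insert]
      have hcongr : Finset.filter (fun p => 2 ≤ (x :: xs).count p) d.toFinset
          = Finset.filter (fun p => 2 ≤ d.count p) d.toFinset := by
        apply Finset.filter_congr
        intro p hp
        have hpne : p ≠ x := fun e => hxd (e ▸ List.mem_toFinset.mp hp)
        simp [hcne p hpne]
      split_ifs with hge
      · rw [Finset.card_insert_of_notMem (by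
          simp only [Finset.mem_filter, List.mem_toFinset]
          exact fun h => hxd h.1), hcongr]
        omega
      · rw [hcongr]
        omega
    rw [runSweep, ← hT, ← hD, ih hpd, hdup, hcx]
    by_cases h2 : 2 ≤ t.length + 1 <;> simp [h2]

lemma dupCount_sorted (l : List String) :
    dupCount (PySem.List.sorted l (fun x => x) false) = dupCount l :=
  dupCount_perm (PySem.List.sorted_perm l _ _)

lemma countP_ofList_eq_dupCount (l : List String) :
    (PySem.Set.ofList l).countP (fun p => decide (2 ≤ l.count p)) = dupCount l := by
  unfold dupCount
  rw [List.countP_eq_length_filter,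
    ← List.toFinset_card_of_nodup ((PySem.Set.nodup_ofList l).filter _),
    List.toFinset_filter]
  congr 1
  ext a
  simp [PySem.Set.mem_ofList]

-- ===== VERDICT (by name: the statement is the Claim_ definition above) =====
theorem prefixConnected_spec : Claim_equal_prefixConnected := by
  intro words k _
  unfold Spec_prefixConnected prefixConnected prefixConnected_alt
  by_cases hw : words = []
  · simp [hw]
  · by_cases hk : k < 0
    · simp [hw, hk]
    · simp only [hw, hk, if_false, or_false]
      rw [foldA_eq_counter k words PySem.Dict.empty,
        PySem.Dict.foldl_insert_getD_add_one_eq_counter,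
        PySem.List.foldl_ite_add_one (fun kv : String × Int => 2 ≤ kv.2),
        PySem.Dict.items_counter, List.countP_map]
      set prefs := (words.filter (fun w => decide (k ≤ PySem.Str.len w))).map
        (fun w => PySem.Str.slice w none (some k)) with hp
      have hpred : ((fun kv : String × Int => decide (2 ≤ kv.2)) ∘
          (fun p => (p, (prefs.count p : Int)))) = fun p => decide (2 ≤ prefs.count p) := by
        funext p
        simp only [Function.comp]
        exact decide_eq_decide.mpr (by exact_mod_cast Iff.rfl)
      have hpair : (PySem.List.sorted prefs (fun x => x) false).Pairwise (· ≤ ·) := by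
        simpa using PySem.List.sorted_pairwise prefs (fun x => x)
      rw [hpred, countP_ofList_eq_dupCount, ← dupCount_sorted prefs,
        ← runSweep_eq_dupCount _ hpair]
      simp
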